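-- pv_equiv track=rewrite | github.com/lenchante17/doear | autoresearch/agent_report.py | parse_report_fields
-- ===== SOURCE A (Python) =====
-- REPORT_LABELS = (
--     "Anchor",
--     "Question",
--     "Alias risk",
--     "Prediction",
--     "Belief",
--     "Next",
--     "Hypothesis",
--     "Change",
--     "Why",
--     "Interpretation",
--     "Expected signal",
--     "Stage",
--     "Factors",
--     "Levels",
--     "Design",
--     "Target effect or interaction",
--     "Observed signal",
--     "Decision",
--     "Verdict",
--     "Review",
-- )
--
-- def parse_report_fields(report_text: str) -> dict[str, str]:
--     report_text = " ".join(report_text.split())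
--     if not report_text:
--         return {}
--
--     fields: dict[str, str] = {}
--     positions: list[tuple[int, str]] = []
--     for label in REPORT_LABELS:
--         marker = f"{label}:"
--         start = report_text.find(marker)
--         if start >= 0:
--             positions.append((start, label))
--     positions.sort()
--
--     if not positions:
--         return {"Review": report_text}
--
--     for index, (start, label) in enumerate(positions):
--         marker = f"{label}:"
--         value_start = start + len(marker)
--         value_end = positions[index + 1][0] if index + 1 < len(positions) else len(report_text)
--         value = report_text[value_start:value_end].strip()
--         if value:
--             fields[label] = value
--     return fields
-- ===== SOURCE B (Python) =====
-- REPORT_LABELS = (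
--     "Anchor",
--     "Question",
--     "Alias risk",
--     "Prediction",
--     "Belief",
--     "Next",
--     "Hypothesis",
--     "Change",
--     "Why",
--     "Interpretation",
--     "Expected signal",
--     "Stage",
--     "Factors",
--     "Levels",
--     "Design",
--     "Target effect or interaction",
--     "Observed signal",
--     "Decision",
--     "Verdict",
--     "Review",
-- )
--
-- def parse_report_fields(report_text: str) -> dict[str, str]:
--     # One left-to-right scan over the normalized text: record each label's FIRST
--     # marker position in encounter order, so the position list is already sorted
--     # and no per-label find() pass and no sort are needed.
--     text = " ".join(report_text.split())
--     if not text: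
--         return {}
--
--     n = len(text)
--     seen = set()
--     positions: list[tuple[int, str]] = []
--     for i in range(n):
--         for label in REPORT_LABELS:
--             if label not in seen and text.startswith(label + ":", i):
--                 seen.add(label)
--                 positions.append((i, label))
--
--     if not positions:
--         return {"Review": text}
--
--     fields: dict[str, str] = {}
--     for (start, label), nxt in zip(positions, positions[1:] + [(n, "")]):
--         value = text[start + len(label) + 1 : nxt[0]].strip()
--         if value:
--             fields[label] = value
--     return fields
-- ===== Notes on version B (the rewrite author's own statement) =====
-- stated objective: alternative
-- what changed: A runs 20 independent str.find scans then sorts the hits and slices via indexed lookups; B does one left-to-right scan over the text recording each label's first marker position in encounter order (already sorted, no sort), then pairs consecutive positions with zip instead of enumerate+index lookups.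
import Mathlib
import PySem

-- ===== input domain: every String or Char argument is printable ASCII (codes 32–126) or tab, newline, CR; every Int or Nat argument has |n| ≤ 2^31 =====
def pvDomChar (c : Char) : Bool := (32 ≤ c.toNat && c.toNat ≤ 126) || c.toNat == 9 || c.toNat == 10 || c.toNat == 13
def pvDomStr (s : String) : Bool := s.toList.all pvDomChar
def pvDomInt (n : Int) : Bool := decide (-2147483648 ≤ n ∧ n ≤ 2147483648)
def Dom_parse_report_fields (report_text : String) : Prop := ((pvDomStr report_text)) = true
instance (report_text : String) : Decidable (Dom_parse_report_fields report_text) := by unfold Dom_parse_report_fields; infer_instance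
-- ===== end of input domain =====

-- B replaces A's 20 independent find() scans plus a sort by one left-to-right scan that
-- emits each label's first marker position already in text order (alternative decomposition).

def pvLabels : List String :=
  ["Anchor", "Question", "Alias risk", "Prediction", "Belief", "Next", "Hypothesis",
   "Change", "Why", "Interpretation", "Expected signal", "Stage", "Factors", "Levels",
   "Design", "Target effect or interaction", "Observed signal", "Decision", "Verdict", "Review"]

-- ===== PORT A =====
def parse_report_fields (report_text : String) : List (String × String) :=
  let t := PySem.Str.join " " (PySem.Str.split₀ report_text)
  if t = "" then []
  else
    let positions : List (Int × String) :=
      pvLabels.foldl (fun acc label =>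
        let start := PySem.Str.find t (label ++ ":")
        if 0 ≤ start then acc ++ [(start, label)] else acc) []
    -- positions.sort(): Python tuple comparison = lexicographic, i.e. the toLex order
    let positions := PySem.List.sorted positions (fun p : Int × String => toLex p)
    if positions = [] then [("Review", t)]
    else
      ((PySem.List.enumerate positions).foldl
        (fun (fields : PySem.Dict String String) q =>
          let marker := q.2.2 ++ ":"
          let value_start := q.2.1 + PySem.Str.len marker
          let value_end := if q.1 + 1 < PySem.List.len positions
            then (PySem.List.pyGetD positions (q.1 + 1) (0, "")).1
            else PySem.Str.len t
          let value := PySem.Str.strip (PySem.Str.slice t (some value_start) (some value_end))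
          if value ≠ "" then fields.insert q.2.2 value else fields)
        PySem.Dict.empty).items

-- ===== PORT B =====
-- text.startswith(marker, i) with 0 ≤ i is exactly startswith on the i-dropped text (ported by hand, exact for 0 ≤ i)
def parse_report_fields_alt (report_text : String) : List (String × String) :=
  let t := PySem.Str.join " " (PySem.Str.split₀ report_text)
  if t = "" then []
  else
    let n := PySem.Str.len t
    let st := (PySem.List.pyRange 0 n 1).foldl (fun st i =>
        pvLabels.foldl (fun (st : PySem.Set String × List (Int × String)) label =>
          if st.1.contains label = false ∧
             PySem.Chars.startswith (t.toList.drop i.toNat) ((label ++ ":").toList) = true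
          then (st.1.add label, st.2 ++ [(i, label)])
          else st) st)
      ((PySem.Set.empty : PySem.Set String), ([] : List (Int × String)))
    let positions := st.2
    if positions = [] then [("Review", t)]
    else
      ((positions.zip (PySem.List.slice positions (some 1) none ++ [(n, "")])).foldl
        (fun (fields : PySem.Dict String String) p =>
          let value := PySem.Str.strip
            (PySem.Str.slice t (some (p.1.1 + PySem.Str.len p.1.2 + 1)) (some p.2.1))
          if value ≠ "" then fields.insert p.1.2 value else fields)
        PySem.Dict.empty).items

-- ===== PRECONDITION & SPEC =====
def Spec_parse_report_fields (report_text : String) (out : List (String × String)) : Prop := out = parse_report_fields_alt report_text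
instance (report_text : String) (out : List (String × String)) : Decidable (Spec_parse_report_fields report_text out) := by unfold Spec_parse_report_fields; infer_instance

-- ===== CLAIM (what is proved, stated in full; the proofs are below) =====
def Claim_equal_parse_report_fields : Prop := ∀ (report_text : String), Dom_parse_report_fields report_text → Spec_parse_report_fields report_text (parse_report_fields report_text)

-- ===== LEMMAS AND PROOFS =====

-- pvF T l: position of the first occurrence of the marker "l:" in T (-1 if absent)
def pvF (T : List Char) (l : String) : Int := PySem.Chars.find T ((l ++ ":").toList)

-- the marker of l occurs in T at position j
def pvMatch (T : List Char) (l : String) (j : Nat) : Prop := ((l ++ ":").toList) <+: T.drop j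

-- A's unsorted positions list
def pvPA (T : List Char) : List (Int × String) :=
  (pvLabels.filter (fun l => decide (0 ≤ pvF T l))).map (fun l => (pvF T l, l))

-- B's positions list, bucketed by scan position
def pvBlock (T : List Char) (j : Nat) : List (Int × String) :=
  (pvLabels.filter (fun l => pvF T l == (j : Int))).map (fun l => ((j : Int), l))

def pvPB (T : List Char) (n : Nat) : List (Int × String) := (List.range n).flatMap (pvBlock T)

def pvInnerBody (T : List Char) (k : Nat) :
    (PySem.Set String × List (Int × String)) → String → (PySem.Set String × List (Int × String)) :=
  fun st label =>
    if st.1.contains label = false ∧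
       PySem.Chars.startswith (T.drop k) ((label ++ ":").toList) = true
    then (st.1.add label, st.2 ++ [(((k : Nat) : Int), label)])
    else st

lemma pv_toList_append (l : String) : (l ++ ":").toList = l.toList ++ [':'] := by
  rw [String.toList_append]; simp

lemma pv_labels_nodup : pvLabels.Nodup := by decide

lemma pv_labels_nocolon : ∀ l ∈ pvLabels, ':' ∉ l.toList := by decide

lemma pv_colon_prefix {c1 c2 : List Char} (h : c1 ++ [':'] <+: c2 ++ [':'])
    (n2 : ':' ∉ c2) : c1 = c2 := by
  have hlen : c1.length + 1 ≤ c2.length + 1 := by simpa using h.length_le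
  by_cases he : c1.length = c2.length
  · exact List.append_cancel_right (h.eq_of_length (by simp [he]))
  · have hlt : c1.length < c2.length := by omega
    have h1 : (c1 ++ [':'])[c1.length]'(by simp) = ':' := List.getElem_concat_length rfl _
    have h2 : (c1 ++ [':'])[c1.length]'(by simp) = (c2 ++ [':'])[c1.length]'(by simp; omega) :=
      h.getElem (by simp)
    have h3 : (c2 ++ [':'])[c1.length]'(by simp; omega) = c2[c1.length]'hlt :=
      List.getElem_append_left hlt
    have heq : c2[c1.length]'hlt = ':' := by rw [← h3, ← h2]; exact h1
    have hmem := List.getElem_mem hlt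
    rw [heq] at hmem
    exact absurd hmem n2

lemma pv_match_unique {T : List Char} {l1 l2 : String} {j : Nat}
    (h1 : pvMatch T l1 j) (h2 : pvMatch T l2 j)
    (m1 : ':' ∉ l1.toList) (m2 : ':' ∉ l2.toList) : l1 = l2 := by
  rw [pvMatch, pv_toList_append] at h1 h2
  apply String.toList_inj.mp
  rcases List.prefix_or_prefix_of_prefix h1 h2 with h | h
  · exact pv_colon_prefix h m2
  · exact (pv_colon_prefix h m1).symm

lemma pv_match_nonneg {T : List Char} {l : String} {j : Nat} (h : pvMatch T l j) :
    0 ≤ pvF T l := by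
  rw [pvF, PySem.Chars.find_nonneg_iff]
  exact (List.IsPrefix.isInfix h).trans (List.drop_suffix j T).isInfix

lemma pvF_lt_len {T : List Char} {l : String} (h : 0 ≤ pvF T l) :
    pvF T l < (T.length : Int) := by
  rw [pvF] at h ⊢
  have hs := (PySem.Chars.find_spec h).1
  have hlen := hs.length_le
  rw [pv_toList_append] at h hlen ⊢
  simp only [List.length_append, List.length_cons, List.length_nil, List.length_drop] at hlen
  have ht := Int.toNat_of_nonneg h
  omega

lemma pvF_eq_iff (T : List Char) (l : String) (j : Nat) :
    pvF T l = (j : Int) ↔ pvMatch T l j ∧ ∀ i < j, ¬ pvMatch T l i := by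
  rw [pvF, pvMatch]
  constructor
  · intro h
    have h0 : 0 ≤ PySem.Chars.find T ((l ++ ":").toList) := by rw [h]; exact Int.natCast_nonneg j
    have hs := PySem.Chars.find_spec h0
    have htn : (PySem.Chars.find T ((l ++ ":").toList)).toNat = j := by rw [h]; simp
    refine ⟨by rw [htn] at hs; exact hs.1, ?_⟩
    intro i hi
    exact hs.2 i (by omega)
  · rintro ⟨hm, hlt⟩
    have h0 : 0 ≤ PySem.Chars.find T ((l ++ ":").toList) := pv_match_nonneg hm
    have hs := PySem.Chars.find_spec h0
    have h1 : ¬ (j < (PySem.Chars.find T ((l ++ ":").toList)).toNat) := fun hj => hs.2 j hj hm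
    have h2 : ¬ ((PySem.Chars.find T ((l ++ ":").toList)).toNat < j) := fun hj => hlt _ hj hs.1
    have ht := Int.toNat_of_nonneg h0
    omega

lemma pvF_match {T : List Char} {l : String} (h : 0 ≤ pvF T l) :
    pvMatch T l (pvF T l).toNat := by
  rw [pvF] at h ⊢
  exact (PySem.Chars.find_spec h).1

lemma pvF_le_of_match {T : List Char} {l : String} {i : Nat} (h : pvMatch T l i) :
    pvF T l ≤ (i : Int) := by
  have h0 := pv_match_nonneg h
  have hs := PySem.Chars.find_spec (show 0 ≤ PySem.Chars.find T ((l ++ ":").toList) from h0)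
  have h1 : ¬ (i < (PySem.Chars.find T ((l ++ ":").toList)).toNat) := fun hj => hs.2 i hj h
  have ht := Int.toNat_of_nonneg h0
  rw [pvF]
  omega

lemma pv_contains_add (s : PySem.Set String) (x y : String) :
    ((s.add x).contains y = true) ↔ (s.contains y = true ∨ y = x) := by
  rw [PySem.Set.contains_iff, PySem.Set.contains_iff]
  exact PySem.Set.mem_add s x y

lemma pv_cond {T : List Char} {k : Nat} {seen : PySem.Set String} {l : String}
    (H : seen.contains l = true ↔ (0 ≤ pvF T l ∧ pvF T l < (k : Int))) :
    (seen.contains l = false ∧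
       PySem.Chars.startswith (T.drop k) ((l ++ ":").toList) = true) ↔ pvF T l = (k : Int) := by
  rw [PySem.Chars.startswith_iff]
  have hP : seen.contains l = false ↔ ¬ (0 ≤ pvF T l ∧ pvF T l < (k : Int)) := by
    rw [← H]
    cases seen.contains l <;> simp
  constructor
  · rintro ⟨hc, hm⟩
    have hm' : pvMatch T l k := hm
    have h0 := pv_match_nonneg hm'
    have hle := pvF_le_of_match hm'
    have hnot := hP.mp hc
    have hge : (k : Int) ≤ pvF T l := by
      by_contra hx
      exact hnot ⟨h0, by omega⟩
    omega
  · intro hf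
    have h0 : 0 ≤ pvF T l := by rw [hf]; exact Int.natCast_nonneg k
    have hm := pvF_match h0
    have htn : (pvF T l).toNat = k := by rw [hf]; simp
    rw [htn] at hm
    refine ⟨hP.mpr ?_, hm⟩
    rintro ⟨_, hlt⟩
    omega

lemma pv_inner (T : List Char) (k : Nat) :
    ∀ (ls : List String) (st : PySem.Set String × List (Int × String)),
    ls.Nodup →
    (∀ l ∈ ls, (st.1.contains l = true ↔ (0 ≤ pvF T l ∧ pvF T l < (k : Int)))) →
    (ls.foldl (pvInnerBody T k) st).2
        = st.2 ++ (ls.filter (fun l => pvF T l == (k : Int))).map (fun l => ((k : Int), l))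
    ∧ ∀ l', ((ls.foldl (pvInnerBody T k) st).1.contains l' = true
        ↔ (st.1.contains l' = true ∨ (l' ∈ ls ∧ pvF T l' = (k : Int)))) := by
  intro ls
  induction ls with
  | nil =>
    intro st _ _
    simp
  | cons l0 ls ih =>
    intro st hnd H
    have H0 := H l0 (List.mem_cons_self ..)
    rw [List.foldl_cons]
    by_cases hc : pvF T l0 = (k : Int)
    · have hcond := (pv_cond H0).mpr hc
      have hstep : pvInnerBody T k st l0 = (st.1.add l0, st.2 ++ [((k : Int), l0)]) := by
        simp only [pvInnerBody]
        rw [if_pos hcond]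
      rw [hstep]
      have hnotmem : l0 ∉ ls := (List.nodup_cons.mp hnd).1
      have H' : ∀ l ∈ ls, ((st.1.add l0).contains l = true ↔ (0 ≤ pvF T l ∧ pvF T l < (k : Int))) := by
        intro l hl
        rw [pv_contains_add]
        have hne : l ≠ l0 := fun he => hnotmem (he ▸ hl)
        rw [← H l (List.mem_cons_of_mem _ hl)]
        simp [hne]
      obtain ⟨ih1, ih2⟩ := ih (st.1.add l0, st.2 ++ [((k : Int), l0)]) (List.nodup_cons.mp hnd).2 H'
      constructor
      · rw [ih1, List.filter_cons_of_pos (by simp [hc]), List.map_cons]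
        simp
      · intro l'
        rw [ih2 l', pv_contains_add]
        constructor
        · rintro (h | ⟨hmem, hf⟩)
          · rcases h with h | rfl
            · exact Or.inl h
            · exact Or.inr ⟨List.mem_cons_self .., hc⟩
          · exact Or.inr ⟨List.mem_cons_of_mem _ hmem, hf⟩
        · rintro (h | ⟨hmem, hf⟩)
          · exact Or.inl (Or.inl h)
          · rcases List.mem_cons.mp hmem with rfl | hmem'
            · exact Or.inl (Or.inr rfl)
            · exact Or.inr ⟨hmem', hf⟩
    · have hcond : ¬ (st.1.contains l0 = false ∧
          PySem.Chars.startswith (T.drop k) ((l0 ++ ":").toList) = true) :=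
        fun hx => hc ((pv_cond H0).mp hx)
      have hstep : pvInnerBody T k st l0 = st := by
        simp only [pvInnerBody]
        rw [if_neg hcond]
      rw [hstep]
      obtain ⟨ih1, ih2⟩ := ih st (List.nodup_cons.mp hnd).2
        (fun l hl => H l (List.mem_cons_of_mem _ hl))
      constructor
      · rw [ih1, List.filter_cons_of_neg (by simp [hc])]
      · intro l'
        rw [ih2 l']
        constructor
        · rintro (h | ⟨hmem, hf⟩)
          · exact Or.inl h
          · exact Or.inr ⟨List.mem_cons_of_mem _ hmem, hf⟩
        · rintro (h | ⟨hmem, hf⟩)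
          · exact Or.inl h
          · rcases List.mem_cons.mp hmem with rfl | hmem'
            · exact absurd hf hc
            · exact Or.inr ⟨hmem', hf⟩

lemma pv_scan (T : List Char) (n : Nat) :
    ((List.range n).foldl (fun st k => pvLabels.foldl (pvInnerBody T k) st)
      ((PySem.Set.empty : PySem.Set String), ([] : List (Int × String)))).2 = pvPB T n
    ∧ ∀ l ∈ pvLabels,
      (((List.range n).foldl (fun st k => pvLabels.foldl (pvInnerBody T k) st)
        ((PySem.Set.empty : PySem.Set String), ([] : List (Int × String)))).1.contains l = true
        ↔ (0 ≤ pvF T l ∧ pvF T l < (n : Int))) := by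
  induction n with
  | zero =>
    constructor
    · simp [pvPB]
    · intro l _
      simp only [List.range_zero, List.foldl_nil]
      constructor
      · intro h
        simp [PySem.Set.contains, PySem.Set.empty] at h
      · rintro ⟨h0, hlt⟩
        omega
  | succ n ih =>
    obtain ⟨ih1, ih2⟩ := ih
    rw [List.range_succ, List.foldl_append, List.foldl_cons, List.foldl_nil]
    obtain ⟨hi1, hi2⟩ := pv_inner T n pvLabels
      ((List.range n).foldl (fun st k => pvLabels.foldl (pvInnerBody T k) st)
        ((PySem.Set.empty : PySem.Set String), ([] : List (Int × String))))
      pv_labels_nodup ih2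
    constructor
    · rw [hi1, ih1]
      simp [pvPB, pvBlock, List.range_succ]
    · intro l hl
      rw [hi2 l, ih2 l hl]
      have hcast : ((n + 1 : Nat) : Int) = (n : Int) + 1 := by push_cast; ring
      rw [hcast]
      constructor
      · rintro (⟨h0, hlt⟩ | ⟨_, hf⟩)
        · exact ⟨h0, by omega⟩
        · exact ⟨by rw [hf]; exact Int.natCast_nonneg n, by rw [hf]; omega⟩
      · rintro ⟨h0, hlt⟩
        by_cases hx : pvF T l < (n : Int)
        · exact Or.inl ⟨h0, hx⟩
        · exact Or.inr ⟨hl, by omega⟩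

lemma pv_mem_PB (T : List Char) (n : Nat) (p : Int × String) :
    p ∈ pvPB T n ↔ (p.2 ∈ pvLabels ∧ pvF T p.2 = p.1 ∧ 0 ≤ p.1 ∧ p.1 < (n : Int)) := by
  rw [pvPB]
  simp only [List.mem_flatMap, List.mem_range, pvBlock, List.mem_map, List.mem_filter,
    beq_iff_eq]
  constructor
  · rintro ⟨j, hj, l, ⟨hl, hf⟩, rfl⟩
    exact ⟨hl, hf, Int.natCast_nonneg j, by omega⟩
  · rintro ⟨hl, hf, h0, hn⟩
    refine ⟨p.1.toNat, by omega, p.2, ⟨hl, by rw [hf]; omega⟩, ?_⟩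
    have : (p.1.toNat : Int) = p.1 := Int.toNat_of_nonneg h0
    rw [this]

lemma pv_mem_PA (T : List Char) (p : Int × String) :
    p ∈ pvPA T ↔ (p.2 ∈ pvLabels ∧ pvF T p.2 = p.1 ∧ 0 ≤ p.1) := by
  rw [pvPA]
  simp only [List.mem_map, List.mem_filter, decide_eq_true_eq]
  constructor
  · rintro ⟨l, ⟨hl, h0⟩, rfl⟩
    exact ⟨hl, rfl, h0⟩
  · rintro ⟨hl, hf, h0⟩
    exact ⟨p.2, ⟨hl, by rw [hf]; exact h0⟩, by rw [hf]⟩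

lemma pv_nodup_PA (T : List Char) : (pvPA T).Nodup := by
  rw [pvPA]
  exact List.Nodup.map (fun a b h => congrArg Prod.snd h) (pv_labels_nodup.filter _)

lemma pv_pairwise_PB (T : List Char) (n : Nat) :
    List.Pairwise (fun a b : Int × String => toLex a < toLex b) (pvPB T n) := by
  rw [pvPB, List.flatMap_def, List.pairwise_flatten]
  constructor
  · intro b hb
    rcases List.mem_map.mp hb with ⟨j, hj, rfl⟩
    have hp : List.Pairwise
        (fun a b : String => ¬(pvF T a = (j : Int) ∧ pvF T b = (j : Int))) pvLabels := by
      refine List.Pairwise.imp_of_mem ?_ pv_labels_nodup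
      intro a b ha hb hne
      rintro ⟨hfa, hfb⟩
      exact hne (pv_match_unique ((pvF_eq_iff T a j).mp hfa).1 ((pvF_eq_iff T b j).mp hfb).1
        (pv_labels_nocolon a ha) (pv_labels_nocolon b hb))
    rw [pvBlock, List.pairwise_map]
    refine List.Pairwise.imp_of_mem ?_ (hp.filter _)
    intro a b ha hb hab
    exact (hab ⟨by simpa using List.of_mem_filter ha, by simpa using List.of_mem_filter hb⟩).elim
  · rw [List.pairwise_map]
    refine List.Pairwise.imp ?_ List.pairwise_lt_range
    intro j1 j2 hlt x hx y hy
    rcases List.mem_map.mp hx with ⟨lx, _, rfl⟩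
    rcases List.mem_map.mp hy with ⟨ly, _, rfl⟩
    rw [Prod.Lex.lt_iff]
    left
    simpa using hlt

lemma pv_perm (T : List Char) : (pvPB T T.length).Perm (pvPA T) := by
  have hnB : (pvPB T T.length).Nodup :=
    (pv_pairwise_PB T T.length).imp (fun h => fun heq => absurd (heq ▸ h) (lt_irrefl _))
  rw [List.perm_ext_iff_of_nodup hnB (pv_nodup_PA T)]
  intro p
  rw [pv_mem_PB, pv_mem_PA]
  constructor
  · rintro ⟨hl, hf, h0, _⟩
    exact ⟨hl, hf, h0⟩
  · rintro ⟨hl, hf, h0⟩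
    exact ⟨hl, hf, h0, by rw [← hf]; exact pvF_lt_len (hf ▸ h0)⟩

lemma pv_sorted (T : List Char) :
    PySem.List.sorted (pvPA T) (fun p : Int × String => toLex p) = pvPB T T.length := by
  exact PySem.List.sorted_eq_of_perm_of_pairwise_lt _ _ _ (pv_perm T) (pv_pairwise_PB T T.length)

lemma pv_zip_eq (ps : List (Int × String)) (e : Int × String) :
    ps.zip (ps.tail ++ [e]) = (PySem.List.enumerate ps).map
      (fun q => (q.2, if q.1 + 1 < PySem.List.len ps
                      then PySem.List.pyGetD ps (q.1 + 1) (0, "") else e)) := by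
  cases ps with
  | nil => simp [PySem.List.enumerate]
  | cons p0 ps' =>
    apply List.ext_getElem
    · simp [PySem.List.length_enumerate]
    · intro k h1 h2
      have hk : k < (p0 :: ps').length := by simp at h1 ⊢; omega
      have hke : k < (PySem.List.enumerate (p0 :: ps')).length := by
        rw [PySem.List.length_enumerate]; exact hk
      rw [List.getElem_zip, List.getElem_map, PySem.List.getElem_enumerate _ _ _ hke]
      simp only [List.tail_cons, PySem.List.len_eq, zero_add]
      by_cases hc : k + 1 < (p0 :: ps').length
      · rw [if_pos (by exact_mod_cast hc)]
        have h1' : ((k : Int) + 1) = ((k + 1 : Nat) : Int) := by push_cast; ring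
        rw [h1', PySem.List.pyGetD_natCast, List.getD_eq_getElem _ _ hc]
        congr 1
        rw [List.getElem_append_left (by simp at hc ⊢; omega), List.getElem_cons_succ]
      · have hkeq : k = ps'.length := by simp at hc hk; omega
        rw [if_neg (by exact_mod_cast hc)]
        congr 1
        exact List.getElem_concat_length hkeq _

set_option maxHeartbeats 1000000 in
lemma pv_loop (t : String) (ps : List (Int × String)) :
    ((PySem.List.enumerate ps).foldl
      (fun (fields : PySem.Dict String String) q =>
        let marker := q.2.2 ++ ":"
        let value_start := q.2.1 + PySem.Str.len marker
        let value_end := if q.1 + 1 < PySem.List.len ps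
          then (PySem.List.pyGetD ps (q.1 + 1) (0, "")).1
          else PySem.Str.len t
        let value := PySem.Str.strip (PySem.Str.slice t (some value_start) (some value_end))
        if value ≠ "" then fields.insert q.2.2 value else fields)
      PySem.Dict.empty)
    = ((ps.zip (PySem.List.slice ps (some 1) none ++ [(PySem.Str.len t, "")])).foldl
      (fun (fields : PySem.Dict String String) p =>
        let value := PySem.Str.strip
          (PySem.Str.slice t (some (p.1.1 + PySem.Str.len p.1.2 + 1)) (some p.2.1))
        if value ≠ "" then fields.insert p.1.2 value else fields)
      PySem.Dict.empty) := by
  rw [PySem.List.slice_from_one]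
  rw [pv_zip_eq ps (PySem.Str.len t, "")]
  rw [List.foldl_map]
  apply PySem.List.foldl_congr_mem
  intro d q _
  dsimp only
  rw [apply_ite (Prod.fst : Int × String → Int)]
  have h1 : PySem.Str.len (q.2.2 ++ ":") = PySem.Str.len q.2.2 + 1 := by
    rw [PySem.Str.len_append]; rfl
  rw [h1, ← add_assoc]

lemma pv_A_positions (t : String) :
    pvLabels.foldl (fun acc label =>
        let start := PySem.Str.find t (label ++ ":")
        if 0 ≤ start then acc ++ [(start, label)] else acc) []
      = pvPA t.toList := by
  have hfun : (fun (acc : List (Int × String)) label =>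
      let start := PySem.Str.find t (label ++ ":")
      if 0 ≤ start then acc ++ [(start, label)] else acc)
      = fun acc label =>
        if (fun l => decide (0 ≤ pvF t.toList l)) label = true
        then acc ++ [(fun l => (pvF t.toList l, l)) label] else acc := by
    funext acc label
    have hf : PySem.Str.find t (label ++ ":") = pvF t.toList label := by
      rw [pvF]; simp
    dsimp only
    rw [hf]
    simp only [decide_eq_true_eq]
  rw [hfun, PySem.List.foldl_append_if]
  simp [pvPA]

lemma pv_B_positions (t : String) :
    ((PySem.List.pyRange 0 (PySem.Str.len t) 1).foldl (fun st i =>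
        pvLabels.foldl (fun (st : PySem.Set String × List (Int × String)) label =>
          if st.1.contains label = false ∧
             PySem.Chars.startswith (t.toList.drop i.toNat) ((label ++ ":").toList) = true
          then (st.1.add label, st.2 ++ [(i, label)])
          else st) st)
      ((PySem.Set.empty : PySem.Set String), ([] : List (Int × String)))).2
    = pvPB t.toList t.toList.length := by
  have hlen : PySem.Str.len t = ((t.toList.length : Nat) : Int) := by
    simp [PySem.Str.len_eq]
  rw [hlen, PySem.List.pyRange_zero_natCast, List.foldl_map]
  have hbody : (fun (st : PySem.Set String × List (Int × String)) (k : Nat) =>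
      pvLabels.foldl (fun (st : PySem.Set String × List (Int × String)) label =>
        if st.1.contains label = false ∧
           PySem.Chars.startswith (t.toList.drop ((k : Int)).toNat) ((label ++ ":").toList) = true
        then (st.1.add label, st.2 ++ [(((k : Nat) : Int), label)])
        else st) st)
      = fun st k => pvLabels.foldl (pvInnerBody t.toList k) st := by
    funext st k
    rfl
  rw [hbody]
  exact (pv_scan t.toList t.toList.length).1

-- ===== VERDICT (by name: the statement is the Claim_ definition above) =====
theorem parse_report_fields_spec : Claim_equal_parse_report_fields := by
  intro s _
  unfold Spec_parse_report_fields parse_report_fields parse_report_fields_alt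
  dsimp only
  set t := PySem.Str.join " " (PySem.Str.split₀ s) with ht
  by_cases h0 : t = ""
  · rw [if_pos h0, if_pos h0]
  · rw [if_neg h0, if_neg h0]
    rw [pv_A_positions t, pv_B_positions t, pv_sorted t.toList]
    by_cases hp : pvPB t.toList t.toList.length = []
    · rw [if_pos hp, if_pos hp]
    · rw [if_neg hp, if_neg hp]
      rw [pv_loop t (pvPB t.toList t.toList.length)]
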